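-- pv_equiv track=rewrite | github.com/Zeeeepa/code-scalpel | src/code_scalpel/code_parsers/java_parsers/java_parsers_Gradle.py | parse_build_output
-- ===== SOURCE A (Python) =====
-- from typing import Any, Dict, List, Optional
--
-- def parse_build_output(text: str) -> List[Dict[str, Any]]:
--     """Parse Gradle build output into structured records."""
--     results: List[Dict[str, Any]] = []
--     for line in text.splitlines():
--         line = line.strip()
--         if not line:
--             continue
--         upper = line.upper()
--         if "BUILD SUCCESSFUL" in upper:
--             results.append({"level": "SUCCESS", "message": line})
--         elif "BUILD FAILED" in upper:
--             results.append({"level": "FAILED", "message": line})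
--         elif upper.startswith("ERROR:") or upper.startswith("> TASK"):
--             results.append({"level": "ERROR", "message": line})
--         elif upper.startswith("W:") or "> Configure" in upper:
--             results.append({"level": "WARNING", "message": line})
--         else:
--             results.append({"level": "INFO", "message": line})
--     return results
-- ===== SOURCE B (Python) =====
-- def _flush(results, buf):
--     line = "".join(buf).strip()
--     if not line:
--         return
--     upper = line.upper()
--     if "BUILD SUCCESSFUL" in upper:
--         level = "SUCCESS"
--     elif "BUILD FAILED" in upper:
--         level = "FAILED"
--     elif upper.startswith("ERROR:") or upper.startswith("> TASK"):
--         level = "ERROR"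
--     elif upper.startswith("W:") or "> Configure" in upper:
--         level = "WARNING"
--     else:
--         level = "INFO"
--     results.append({"level": level, "message": line})
--
--
-- def parse_build_output(text):
--     """Parse Gradle build output into structured records.
--
--     Single character-level scan: accumulates the current line in a buffer and
--     flushes it at each line break (\n, \r or \r\n) and at end of input,
--     instead of splitlines()+strip per line. Exact on ASCII text (tab/space/
--     newline/CR whitespace); it does not treat \x0b/\x0c/\x1c-\x1e as breaks.
--     """
--     results = []
--     buf = []
--     i, n = 0, len(text)
--     while True:
--         if i >= n:
--             _flush(results, buf)
--             return results
--         ch = text[i]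
--         if ch == "\r" and i + 1 < n and text[i + 1] == "\n":
--             _flush(results, buf)
--             buf = []
--             i += 2
--         elif ch == "\n" or ch == "\r":
--             _flush(results, buf)
--             buf = []
--             i += 1
--         else:
--             buf.append(ch)
--             i += 1
-- ===== Notes on version B (the rewrite author's own statement) =====
-- stated objective: alternative
-- what changed: Replaces splitlines() plus a per-line strip/classify loop with a single character-level scanner that buffers the current line and flushes it at each \n, \r or \r\n break and at end of input.
import Mathlib
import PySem

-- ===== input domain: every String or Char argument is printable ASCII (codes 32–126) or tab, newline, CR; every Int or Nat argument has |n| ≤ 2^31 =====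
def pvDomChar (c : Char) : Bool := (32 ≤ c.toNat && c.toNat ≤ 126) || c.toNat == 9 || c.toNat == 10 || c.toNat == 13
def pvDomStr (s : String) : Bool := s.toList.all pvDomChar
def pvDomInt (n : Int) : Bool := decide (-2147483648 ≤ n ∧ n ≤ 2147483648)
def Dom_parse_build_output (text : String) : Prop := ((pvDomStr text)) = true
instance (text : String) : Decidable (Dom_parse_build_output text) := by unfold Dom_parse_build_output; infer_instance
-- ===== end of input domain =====

-- B replaces splitlines()+per-line strip with one character-level scan that buffers the
-- current line and flushes at \n / \r / \r\n and at end of input (alternative; same cost).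
-- On the stated domain (printable ASCII + tab/newline/CR) the line boundaries coincide.

-- ===== PORT A =====
def parse_build_output (text : String) : List (List (String × String)) :=
  (PySem.Str.splitlines text).foldl (fun results line0 =>
    let line := PySem.Str.strip line0
    if line = "" then results
    else
      let upper := PySem.Str.upper line
      if PySem.Str.isIn "BUILD SUCCESSFUL" upper then
        results ++ [[("level", "SUCCESS"), ("message", line)]]
      else if PySem.Str.isIn "BUILD FAILED" upper then
        results ++ [[("level", "FAILED"), ("message", line)]]
      else if PySem.Str.startswith upper "ERROR:" || PySem.Str.startswith upper "> TASK" then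
        results ++ [[("level", "ERROR"), ("message", line)]]
      else if PySem.Str.startswith upper "W:" || PySem.Str.isIn "> Configure" upper then
        results ++ [[("level", "WARNING"), ("message", line)]]
      else
        results ++ [[("level", "INFO"), ("message", line)]]) []

-- ===== PORT B =====
-- _flush(results, buf) of Source B
def pbFlush (results : List (List (String × String))) (buf : List Char) : List (List (String × String)) :=
  let line := PySem.Str.strip (String.ofList buf)
  if line = "" then results
  else
    let upper := PySem.Str.upper line
    if PySem.Str.isIn "BUILD SUCCESSFUL" upper then
      results ++ [[("level", "SUCCESS"), ("message", line)]]
    else if PySem.Str.isIn "BUILD FAILED" upper then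
      results ++ [[("level", "FAILED"), ("message", line)]]
    else if PySem.Str.startswith upper "ERROR:" || PySem.Str.startswith upper "> TASK" then
      results ++ [[("level", "ERROR"), ("message", line)]]
    else if PySem.Str.startswith upper "W:" || PySem.Str.isIn "> Configure" upper then
      results ++ [[("level", "WARNING"), ("message", line)]]
    else
      results ++ [[("level", "INFO"), ("message", line)]]

-- the while-loop of Source B: remaining characters, current line buffer, results so far
def pbGo : List Char → List Char → List (List (String × String)) → List (List (String × String))
  | [], buf, results => pbFlush results buf
  | '\r' :: '\n' :: rest, buf, results => pbGo rest [] (pbFlush results buf)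
  | c :: rest, buf, results =>
      if c = '\n' || c = '\r' then pbGo rest [] (pbFlush results buf)
      else pbGo rest (buf ++ [c]) results

def parse_build_output_alt (text : String) : List (List (String × String)) :=
  pbGo text.toList [] []

-- ===== PRECONDITION & SPEC =====
def Spec_parse_build_output (text : String) (out : List (List (String × String))) : Prop := out = parse_build_output_alt text
instance (text : String) (out : List (List (String × String))) : Decidable (Spec_parse_build_output text out) := by unfold Spec_parse_build_output; infer_instance

-- ===== CLAIM (what is proved, stated in full; the proofs are below) =====
def Claim_equal_parse_build_output : Prop := ∀ (text : String), Dom_parse_build_output text → Spec_parse_build_output text (parse_build_output text)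

-- ===== LEMMAS AND PROOFS =====
-- A's per-line fold step, named for the proofs
def pvStepA (results : List (List (String × String))) (line0 : String) : List (List (String × String)) :=
  let line := PySem.Str.strip line0
  if line = "" then results
  else
    let upper := PySem.Str.upper line
    if PySem.Str.isIn "BUILD SUCCESSFUL" upper then
      results ++ [[("level", "SUCCESS"), ("message", line)]]
    else if PySem.Str.isIn "BUILD FAILED" upper then
      results ++ [[("level", "FAILED"), ("message", line)]]
    else if PySem.Str.startswith upper "ERROR:" || PySem.Str.startswith upper "> TASK" then
      results ++ [[("level", "ERROR"), ("message", line)]]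
    else if PySem.Str.startswith upper "W:" || PySem.Str.isIn "> Configure" upper then
      results ++ [[("level", "WARNING"), ("message", line)]]
    else
      results ++ [[("level", "INFO"), ("message", line)]]

-- the line-break test splitlines uses, as a named definition
def pvIsB (c : Char) : Bool :=
  c.toNat = 10 || c.toNat = 13 || c.toNat = 11 || c.toNat = 12 || c.toNat = 28 ||
    c.toNat = 29 || c.toNat = 30 || c.toNat = 133 || c.toNat = 8232 || c.toNat = 8233

-- recursion skeleton of the \r\n-aware scan, used only for its induction principle
def pvShape : List Char → Nat
  | [] => 0
  | '\r' :: '\n' :: rest => pvShape rest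
  | _ :: rest => pvShape rest

theorem pvFlush_eq_stepA (res : List (List (String × String))) (buf : List Char) :
    pbFlush res buf = pvStepA res (String.ofList buf) := rfl

theorem pvIsB_dom (c : Char) (h : pvDomChar c = true) :
    pvIsB c = (c = '\n' || c = '\r') := by
  have h10 : (c = '\n') ↔ (c.toNat = 10) := by
    constructor
    · rintro rfl; rfl
    · intro hn; exact Char.ext (UInt32.toNat_inj.mp hn)
  have h13 : (c = '\r') ↔ (c.toNat = 13) := by
    constructor
    · rintro rfl; rfl
    · intro hn; exact Char.ext (UInt32.toNat_inj.mp hn)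
  unfold pvIsB pvDomChar at *
  simp only [Bool.or_eq_true, Bool.and_eq_true, decide_eq_true_eq, beq_iff_eq] at h ⊢
  by_cases e10 : c.toNat = 10 <;> by_cases e13 : c.toNat = 13 <;>
    simp [h10, h13, e10, e13] <;> omega

theorem pvGo_acc (isB : Char → Bool) (cs : List Char) :
    ∀ cur acc, PySem.Chars.splitlines.go isB cs cur acc
      = acc.reverse ++ PySem.Chars.splitlines.go isB cs cur [] := by
  induction cs using pvShape.induct with
  | case1 =>
      intro cur acc
      simp only [PySem.Chars.splitlines.go.eq_1]
      split <;> simp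
  | case2 rest ih =>
      intro cur acc
      rw [PySem.Chars.splitlines.go.eq_2, PySem.Chars.splitlines.go.eq_2,
        ih [] (cur.reverse :: acc), ih [] [cur.reverse]]
      simp
  | case3 c rest h ih =>
      intro cur acc
      rw [PySem.Chars.splitlines.go.eq_3 isB cur acc c rest h,
        PySem.Chars.splitlines.go.eq_3 isB cur [] c rest h]
      by_cases hb : isB c = true
      · rw [if_pos hb, if_pos hb, ih [] (cur.reverse :: acc), ih [] [cur.reverse]]
        simp
      · rw [if_neg hb, if_neg hb]
        exact ih (c :: cur) acc

theorem pvMain (cs : List Char) :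
    ∀ buf res, (∀ c ∈ cs, pvDomChar c = true) →
      pbGo cs buf res
        = List.foldl pvStepA res
            ((PySem.Chars.splitlines.go pvIsB cs buf.reverse []).map String.ofList) := by
  induction cs using pvShape.induct with
  | case1 =>
      intro buf res _
      simp only [PySem.Chars.splitlines.go.eq_1, List.isEmpty_iff, List.reverse_eq_nil_iff]
      by_cases hb : buf = []
      · subst hb; simp; rfl
      · rw [if_neg hb]
        simp only [List.reverse_reverse, List.reverse_cons, List.reverse_nil, List.nil_append,
          List.map_cons, List.map_nil, List.foldl_cons, List.foldl_nil]
        exact pvFlush_eq_stepA res buf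
  | case2 rest ih =>
      intro buf res hdom
      have hrest : ∀ c ∈ rest, pvDomChar c = true := fun c hc =>
        hdom c (by simp [hc])
      rw [PySem.Chars.splitlines.go.eq_2,
        pvGo_acc pvIsB rest [] (buf.reverse.reverse :: [])]
      simp only [List.reverse_reverse, List.reverse_cons, List.reverse_nil, List.nil_append,
        List.map_append, List.map_cons, List.map_nil, List.foldl_append, List.foldl_cons,
        List.foldl_nil]
      rw [← pvFlush_eq_stepA res buf]
      have := ih [] (pbFlush res buf) hrest
      simpa using this
  | case3 c rest h ih =>
      intro buf res hdom
      have hc : pvDomChar c = true := hdom c (by simp)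
      have hrest : ∀ c ∈ rest, pvDomChar c = true := fun c hc =>
        hdom c (by simp [hc])
      rw [pbGo.eq_3 buf res c rest h,
        PySem.Chars.splitlines.go.eq_3 pvIsB buf.reverse [] c rest h,
        pvIsB_dom c hc]
      by_cases hb : (c = '\n' || c = '\r') = true
      · rw [if_pos hb, if_pos hb, pvGo_acc pvIsB rest [] (buf.reverse.reverse :: [])]
        simp only [List.reverse_reverse, List.reverse_cons, List.reverse_nil, List.nil_append,
          List.map_append, List.map_cons, List.map_nil, List.foldl_append, List.foldl_cons,
          List.foldl_nil]
        rw [← pvFlush_eq_stepA res buf]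
        have := ih [] (pbFlush res buf) hrest
        simpa using this
      · rw [if_neg hb, if_neg hb]
        have := ih (buf ++ [c]) res hrest
        simpa using this

-- ===== VERDICT (by name: the statement is the Claim_ definition above) =====
theorem parse_build_output_spec : Claim_equal_parse_build_output := by
  intro text hdom
  show parse_build_output text = parse_build_output_alt text
  have hA : parse_build_output text
      = List.foldl pvStepA [] (PySem.Str.splitlines text) := rfl
  have hsl : PySem.Str.splitlines text
      = (PySem.Chars.splitlines.go pvIsB text.toList [] []).map String.ofList := rfl
  have hall : ∀ c ∈ text.toList, pvDomChar c = true := by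
    have := hdom
    unfold Dom_parse_build_output pvDomStr at this
    simpa [List.all_eq_true] using this
  rw [hA, hsl]
  have h := pvMain text.toList [] [] hall
  simp only [List.reverse_nil] at h
  exact h.symm
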